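-- pv_equiv track=rewrite | github.com/pmbstyle/Octopal | src/octopal/runtime/workers/runtime.py | _extract_mcp_tool_identity
-- ===== SOURCE A (Python) =====
-- def _extract_mcp_tool_identity(tool_name: str, server_ids: list[str]) -> tuple[str | None, str | None]:
--     """Best-effort extraction of MCP server and remote tool names from generated tool names."""
--     if not tool_name.startswith("mcp_"):
--         return None, None
--     # Preferred path: longest matching normalized server id prefix.
--     normalized = sorted(((sid.replace("-", "_"), sid) for sid in server_ids), key=lambda x: len(x[0]), reverse=True)
--     for safe_id, original_id in normalized:
--         prefix = f"mcp_{safe_id}_"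
--         if tool_name.startswith(prefix):
--             remote_safe_name = tool_name[len(prefix):]
--             return original_id, remote_safe_name
--
--     # Legacy fallback if server list is unavailable.
--     parts = tool_name.split("_")
--     if len(parts) < 3:
--         return None, None
--     return parts[1], "_".join(parts[2:])
-- ===== SOURCE B (Python) =====
-- def _extract_mcp_tool_identity(tool_name: str, server_ids: list[str]) -> tuple[str | None, str | None]:
--     """Best-effort extraction of MCP server and remote tool names from generated tool names."""
--     if not tool_name.startswith("mcp_"):
--         return None, None
--     # Single linear pass: keep the longest matching normalized prefix; strict '>' keeps
--     # the earliest server id in original order on equal lengths (matching the stable sort).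
--     best = None  # (prefix_length, original_id)
--     for sid in server_ids:
--         prefix = "mcp_" + sid.replace("-", "_") + "_"
--         if tool_name.startswith(prefix) and (best is None or len(prefix) > best[0]):
--             best = (len(prefix), sid)
--     if best is not None:
--         return best[1], tool_name[best[0]:]
--
--     # Legacy fallback if server list is unavailable.
--     parts = tool_name.split("_")
--     if len(parts) < 3:
--         return None, None
--     return parts[1], "_".join(parts[2:])
-- ===== Notes on version B (the rewrite author's own statement) =====
-- stated objective: alternative
-- what changed: B drops the sort-by-length-descending pass entirely and does one linear scan over server_ids in original order, keeping the longest matching normalized prefix with strict '>' so the earliest id wins ties; the legacy split fallback is unchanged.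
import Mathlib
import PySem

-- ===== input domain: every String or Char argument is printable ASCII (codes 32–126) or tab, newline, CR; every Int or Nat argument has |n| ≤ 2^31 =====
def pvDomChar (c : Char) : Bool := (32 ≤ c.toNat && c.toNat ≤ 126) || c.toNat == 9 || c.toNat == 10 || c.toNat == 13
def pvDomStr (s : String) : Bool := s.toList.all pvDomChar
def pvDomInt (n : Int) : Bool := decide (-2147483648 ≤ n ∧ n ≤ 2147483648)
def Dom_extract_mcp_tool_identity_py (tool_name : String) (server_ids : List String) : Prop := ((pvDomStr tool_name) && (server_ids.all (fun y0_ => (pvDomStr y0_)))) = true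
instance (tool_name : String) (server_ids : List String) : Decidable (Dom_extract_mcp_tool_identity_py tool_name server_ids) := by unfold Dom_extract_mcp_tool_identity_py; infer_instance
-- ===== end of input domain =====

-- B replaces A's sort-by-length-descending + first-match loop by a single linear scan that
-- keeps the longest matching normalized prefix (strict '>' so the earliest id wins ties).

-- Python string concatenation a + b (exact: Python's str + is code-point concatenation)
def pyCat (a b : String) : String := String.ofList (a.toList ++ b.toList)

-- ===== PORT A =====
-- the for-loop over `normalized`: first pair whose prefix matches
def aLoop (tool_name : String) : List (String × String) → Option (Option String × Option String)
  | [] => none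
  | (safe_id, original_id) :: rest =>
    let pfx := pyCat (pyCat "mcp_" safe_id) "_"          -- f"mcp_{safe_id}_"
    if PySem.Str.startswith tool_name pfx then
      some (some original_id, some (PySem.Str.slice tool_name (some (PySem.Str.len pfx)) none))
    else aLoop tool_name rest

def extract_mcp_tool_identity_py (tool_name : String) (server_ids : List String) : Option String × Option String :=
  if ¬ PySem.Str.startswith tool_name "mcp_" then (none, none)
  else
    let normalized := PySem.List.sorted
      (server_ids.map (fun sid => (PySem.Str.replace sid "-" "_", sid)))
      (fun x => PySem.Str.len x.1) true
    match aLoop tool_name normalized with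
    | some r => r
    | none =>
      let parts := (PySem.Str.split? tool_name "_").getD []   -- sep "_" ≠ "": split? is always `some`
      if (parts.length : Int) < 3 then (none, none)
      else (PySem.List.pyGet? parts 1, some (PySem.Str.join "_" (PySem.List.slice parts (some 2) none)))

-- ===== PORT B =====
-- single pass: best = (prefix length, original id), strict '>' keeps the earliest id on ties
def bLoop (tool_name : String) (best : Option (Int × String)) : List String → Option (Int × String)
  | [] => best
  | sid :: rest =>
    let pfx := pyCat (pyCat "mcp_" (PySem.Str.replace sid "-" "_")) "_"
    bLoop tool_name
      (if PySem.Str.startswith tool_name pfx &&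
          (match best with | none => true | some (l, _) => decide (l < PySem.Str.len pfx))
       then some (PySem.Str.len pfx, sid) else best) rest

def extract_mcp_tool_identity_py_alt (tool_name : String) (server_ids : List String) : Option String × Option String :=
  if ¬ PySem.Str.startswith tool_name "mcp_" then (none, none)
  else
    match bLoop tool_name none server_ids with
    | some (l, sid) => (some sid, some (PySem.Str.slice tool_name (some l) none))
    | none =>
      let parts := (PySem.Str.split? tool_name "_").getD []   -- sep "_" ≠ "": split? is always `some`
      if (parts.length : Int) < 3 then (none, none)
      else (PySem.List.pyGet? parts 1, some (PySem.Str.join "_" (PySem.List.slice parts (some 2) none)))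

-- ===== PRECONDITION & SPEC =====
def Spec_extract_mcp_tool_identity_py (tool_name : String) (server_ids : List String) (out : Option String × Option String) : Prop := out = extract_mcp_tool_identity_py_alt tool_name server_ids
instance (tool_name : String) (server_ids : List String) (out : Option String × Option String) : Decidable (Spec_extract_mcp_tool_identity_py tool_name server_ids out) := by unfold Spec_extract_mcp_tool_identity_py; infer_instance

-- ===== CLAIM (what is proved, stated in full; the proofs are below) =====
def Claim_equal_extract_mcp_tool_identity_py : Prop := ∀ (tool_name : String) (server_ids : List String), Dom_extract_mcp_tool_identity_py tool_name server_ids → Spec_extract_mcp_tool_identity_py tool_name server_ids (extract_mcp_tool_identity_py tool_name server_ids)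

-- ===== LEMMAS AND PROOFS =====

def mkPfx (s : String) : String := pyCat (pyCat "mcp_" s) "_"

-- one step of B's scan (proof-side name for the body of bLoop)
def bStep (t : String) (b : Option (Int × String)) (sid : String) : Option (Int × String) :=
  if PySem.Str.startswith t (mkPfx (PySem.Str.replace sid "-" "_")) &&
      (match b with | none => true | some (l, _) => decide (l < PySem.Str.len (mkPfx (PySem.Str.replace sid "-" "_"))))
  then some (PySem.Str.len (mkPfx (PySem.Str.replace sid "-" "_")), sid) else b

lemma toList_pyCat (a b : String) : (pyCat a b).toList = a.toList ++ b.toList := by simp [pyCat]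

lemma len_mkPfx (s : String) : PySem.Str.len (mkPfx s) = PySem.Str.len s + 5 := by
  simp only [PySem.Str.len_eq, mkPfx, toList_pyCat, List.length_append]
  have h1 : "mcp_".toList.length = 4 := rfl
  have h2 : "_".toList.length = 1 := rfl
  omega

lemma bLoop_nil (t : String) (b : Option (Int × String)) : bLoop t b [] = b := by
  rw [bLoop.eq_def]

lemma bLoop_cons (t : String) (b : Option (Int × String)) (y : String) (rest : List String) :
    bLoop t b (y :: rest) = bLoop t (bStep t b y) rest := by
  rw [bLoop.eq_def]
  rfl

lemma bLoop_append (t : String) (b : Option (Int × String)) (l : List String) (x : String) :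
    bLoop t b (l ++ [x]) = bStep t (bLoop t b l) x := by
  induction l generalizing b with
  | nil => rw [List.nil_append, bLoop_cons, bLoop_nil, bLoop_nil]
  | cons y rest ih => rw [List.cons_append, bLoop_cons, ih, bLoop_cons]

-- A's loop is `find?` of the first matching pair, converted to the returned tuple
lemma aLoop_eq_find? (t : String) (xs : List (String × String)) :
    aLoop t xs =
      (xs.find? (fun p => PySem.Str.startswith t (mkPfx p.1))).map
        (fun p => (some p.2, some (PySem.Str.slice t (some (PySem.Str.len (mkPfx p.1))) none))) := by
  induction xs with
  | nil => rw [aLoop.eq_def]; rfl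
  | cons p rest ih =>
    obtain ⟨safe, orig⟩ := p
    rw [aLoop.eq_def]
    dsimp only
    rw [show pyCat (pyCat "mcp_" safe) "_" = mkPfx safe from rfl]
    rw [List.find?_cons]
    by_cases hP : PySem.Str.startswith t (mkPfx safe) = true
    · rw [if_pos hP]
      dsimp only
      rw [hP]
      rfl
    · rw [if_neg hP, ih]
      dsimp only
      rw [Bool.not_eq_true] at hP
      rw [hP]

-- first match in a stable descending insertion, from the first match of the sorted tail
lemma find?_insertBy {α : Type} (key : α → Int) (P : α → Bool) (x : α) (acc : List α)
    (hs : acc.Pairwise (fun a b => key b ≤ key a)) :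
    (PySem.List.insertBy (fun a b => decide (key b < key a)) x acc).find? P =
      match acc.find? P with
      | none => if P x then some x else none
      | some r => if P x && decide (key r < key x) then some x else some r := by
  induction acc with
  | nil => simp [PySem.List.insertBy, List.find?]
  | cons y rest ih =>
    have hy : ∀ a ∈ rest, key a ≤ key y := fun a ha => (List.pairwise_cons.mp hs).1 a ha
    have hrest : rest.Pairwise (fun a b => key b ≤ key a) := (List.pairwise_cons.mp hs).2
    by_cases hlt : key y < key x
    · have hins : PySem.List.insertBy (fun a b => decide (key b < key a)) x (y :: rest) = x :: y :: rest := by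
        simp [PySem.List.insertBy, hlt]
      rw [hins]
      by_cases hPx : P x = true
      · by_cases hPy : P y = true
        · simp [List.find?, hPx, hPy, hlt]
        · simp only [List.find?, hPx, hPy, if_true]
          cases hr : rest.find? P with
          | none => simp
          | some r =>
            have hrmem : r ∈ rest := List.mem_of_find?_eq_some hr
            have : key r < key x := lt_of_le_of_lt (hy r hrmem) hlt
            simp [this]
      · simp only [Bool.not_eq_true] at hPx
        simp only [List.find?, hPx]
        cases hPy : P y with
        | true => simp
        | false => cases hr : rest.find? P <;> simp
    · have hins : PySem.List.insertBy (fun a b => decide (key b < key a)) x (y :: rest) =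
          y :: PySem.List.insertBy (fun a b => decide (key b < key a)) x rest := by
        simp [PySem.List.insertBy, hlt]
      rw [hins]
      by_cases hPy : P y = true
      · simp [List.find?, hPy, hlt]
      · simp only [List.find?, hPy, ih hrest]

-- main loop correspondence: B's scan computes (prefix length, id) of A's first sorted match
lemma bLoop_eq_find? (t : String) (l : List String) :
    bLoop t none l =
      ((PySem.List.sorted (l.map (fun sid => (PySem.Str.replace sid "-" "_", sid)))
          (fun x => PySem.Str.len x.1) true).find?
        (fun p => PySem.Str.startswith t (mkPfx p.1))).map
        (fun p => (PySem.Str.len (mkPfx p.1), p.2)) := by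
  induction l using List.reverseRecOn with
  | nil =>
    rw [show PySem.List.sorted ((([] : List String)).map
        (fun sid => (PySem.Str.replace sid "-" "_", sid))) (fun x => PySem.Str.len x.1) true = [] from
      (PySem.List.sorted_eq_nil_iff _ _ _).mpr rfl]
    rw [bLoop_nil]; rfl
  | append_singleton l x ih =>
    rw [bLoop_append]
    rw [PySem.List.sorted_rev_eq_foldl_insertBy, List.map_append, List.foldl_append,
        ← PySem.List.sorted_rev_eq_foldl_insertBy]
    simp only [List.map_cons, List.map_nil, List.foldl_cons, List.foldl_nil]
    rw [find?_insertBy (fun p : String × String => PySem.Str.len p.1) _ _ _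
          (PySem.List.sorted_pairwise_rev _ _)]
    cases hf : (PySem.List.sorted (l.map fun sid => (PySem.Str.replace sid "-" "_", sid))
        (fun x => PySem.Str.len x.1) true).find? (fun p => PySem.Str.startswith t (mkPfx p.1)) with
    | none =>
      rw [hf] at ih
      rw [ih]
      simp only [Option.map_none, bStep]
      by_cases hP : PySem.Str.startswith t (mkPfx (PySem.Str.replace x "-" "_")) = true
      · rw [if_pos (by rw [Bool.and_eq_true_iff]; exact ⟨hP, rfl⟩), if_pos hP, Option.map_some]
      · rw [if_neg (fun hc => hP (Bool.and_eq_true_iff.mp hc).1), if_neg hP, Option.map_none]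
    | some r =>
      rw [hf] at ih
      rw [ih]
      simp only [Option.map_some, bStep]
      have hkey : (PySem.Str.len (mkPfx r.1) < PySem.Str.len (mkPfx (PySem.Str.replace x "-" "_"))) ↔
          (PySem.Str.len r.1 < PySem.Str.len (PySem.Str.replace x "-" "_")) := by
        rw [len_mkPfx, len_mkPfx]; omega
      by_cases hP : PySem.Str.startswith t (mkPfx (PySem.Str.replace x "-" "_")) = true
      · by_cases h2 : PySem.Str.len r.1 < PySem.Str.len (PySem.Str.replace x "-" "_")
        · rw [if_pos (by rw [Bool.and_eq_true_iff]; exact ⟨hP, decide_eq_true (hkey.mpr h2)⟩),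
              if_pos (by rw [Bool.and_eq_true_iff]; exact ⟨hP, decide_eq_true h2⟩), Option.map_some]
        · rw [if_neg (fun hc => h2 (hkey.mp (of_decide_eq_true (Bool.and_eq_true_iff.mp hc).2))),
              if_neg (fun hc => h2 (of_decide_eq_true (Bool.and_eq_true_iff.mp hc).2)), Option.map_some]
      · rw [if_neg (fun hc => hP (Bool.and_eq_true_iff.mp hc).1),
            if_neg (fun hc => hP (Bool.and_eq_true_iff.mp hc).1), Option.map_some]

-- ===== VERDICT (by name: the statement is the Claim_ definition above) =====
theorem extract_mcp_tool_identity_py_spec : Claim_equal_extract_mcp_tool_identity_py := by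
  intro tool_name server_ids _
  unfold Spec_extract_mcp_tool_identity_py
  unfold extract_mcp_tool_identity_py extract_mcp_tool_identity_py_alt
  dsimp only
  by_cases h0 : ¬ PySem.Str.startswith tool_name "mcp_" = true
  · rw [if_pos h0, if_pos h0]
  · rw [if_neg h0, if_neg h0]
    rw [aLoop_eq_find?, bLoop_eq_find? tool_name server_ids]
    cases hf : (PySem.List.sorted (server_ids.map fun sid => (PySem.Str.replace sid "-" "_", sid))
        (fun x => PySem.Str.len x.1) true).find?
        (fun p => PySem.Str.startswith tool_name (mkPfx p.1)) <;> rfl
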